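-- pv_equiv track=rewrite | github.com/tomorrowdevs-projects/programming-basics | projects/m2/013-tokenizing-a-string/solutions/jimmyhu/solution-tokenizing-a-string.py | tokenizing
-- ===== SOURCE A (Python) =====
-- def tokenizing(str):
--     data = list(str)
--     tokened = [' ']
--     for i in range(1,len(data)):
--         if data[i].isnumeric() and tokened[len(tokened)-1].isnumeric():
--             tokened[len(tokened)-1] = f"{tokened[len(tokened)-1]}{data[i]}"
--         elif data[i] == ' ':
--             continue
--         else:
--             tokened.append(data[i])
--     tokened.remove(' ')
--     return tokened
-- ===== SOURCE B (Python) =====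
-- def tokenizing(str):
--     # A examines str[1:] only (its loop starts at index 1) and treats spaces as
--     # transparent, so adjacent digit runs separated only by spaces merge.
--     stream = [c for c in list(str)[1:] if c != ' ']
--     out = []
--     i = 0
--     n = len(stream)
--     while i < n:
--         if stream[i].isnumeric():
--             j = i
--             while j < n and stream[j].isnumeric():
--                 j += 1
--             out.append(''.join(stream[i:j]))
--             i = j
--         else:
--             out.append(stream[i])
--             i += 1
--     return out
-- ===== Notes on version B (the rewrite author's own statement) =====
-- stated objective: alternative
-- what changed: A's single sentinel-anchored scan that mutates the last token in place (with spaces skipped inline) is replaced by pre-filtering spaces out of str[1:] and then a run-length pass that emits each maximal digit run as one token and every other character as its own token.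
import Mathlib
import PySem

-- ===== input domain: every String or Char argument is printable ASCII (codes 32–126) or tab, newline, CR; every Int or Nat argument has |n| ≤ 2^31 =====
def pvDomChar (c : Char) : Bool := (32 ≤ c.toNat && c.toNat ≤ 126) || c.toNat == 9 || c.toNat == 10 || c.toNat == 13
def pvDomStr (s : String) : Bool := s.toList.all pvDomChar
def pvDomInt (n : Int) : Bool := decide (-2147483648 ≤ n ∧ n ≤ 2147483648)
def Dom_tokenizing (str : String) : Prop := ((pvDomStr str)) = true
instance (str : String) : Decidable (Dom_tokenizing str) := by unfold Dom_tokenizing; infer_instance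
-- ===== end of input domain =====

-- B replaces A's sentinel-anchored scan (mutating the last token in place, spaces transparent)
-- by: pre-filter the spaces out of str[1:], then emit digit runs / single characters in one
-- run-length pass (objective: alternative decomposition, same cost).

-- ===== PORT A =====
-- one loop step of A; `.isnumeric()` is ported as PySem isdigit, exact on the ASCII domain
def tokStep (tokened : List String) (c : Char) : List String :=
  let last := (tokened.getLast?).getD ""   -- tokened[len(tokened)-1]; tokened is never empty
  if PySem.Chars.isdigit c && PySem.Str.strIsdigit last then
    tokened.dropLast ++ [last.push c]      -- tokened[-1] = f"{tokened[-1]}{data[i]}"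
  else if c = ' ' then tokened
  else tokened ++ [String.ofList [c]]

def tokenizing (str : String) : List String :=
  let data := str.toList
  let tokened := (data.drop 1).foldl tokStep [" "]   -- for i in range(1, len(data))
  (PySem.List.remove? tokened " ").getD []           -- tokened.remove(' '); the sentinel ' ' is always present

-- ===== PORT B =====
-- run-length pass over the space-free stream: a digit run becomes one token, any other
-- character its own token (takeWhile/dropWhile = the inner `while j < n and …` scan)
def altGo : List Char → List String
  | [] => []
  | c :: rest =>
    if PySem.Chars.isdigit c then
      String.ofList (c :: rest.takeWhile PySem.Chars.isdigit) :: altGo (rest.dropWhile PySem.Chars.isdigit)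
    else
      String.ofList [c] :: altGo rest
termination_by l => l.length
decreasing_by
  · have := List.length_dropWhile_le PySem.Chars.isdigit rest
    simp; omega
  · simp

def tokenizing_alt (str : String) : List String :=
  altGo ((str.toList.drop 1).filter (fun c => c != ' '))

-- ===== PRECONDITION & SPEC =====
def Spec_tokenizing (str : String) (out : List String) : Prop := out = tokenizing_alt str
instance (str : String) (out : List String) : Decidable (Spec_tokenizing str out) := by unfold Spec_tokenizing; infer_instance

-- ===== CLAIM (what is proved, stated in full; the proofs are below) =====
def Claim_equal_tokenizing : Prop := ∀ (str : String), Dom_tokenizing str → Spec_tokenizing str (tokenizing str)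

-- ===== LEMMAS AND PROOFS =====

-- spaces are transparent to A's loop, so the fold may be taken over the space-free stream
theorem tokStep_space (acc : List String) : tokStep acc ' ' = acc := by
  simp [tokStep, PySem.Chars.isdigit]

theorem foldl_tokStep_filter (l : List Char) (acc : List String) :
    l.foldl tokStep acc = (l.filter (fun c => c != ' ')).foldl tokStep acc := by
  induction l generalizing acc with
  | nil => rfl
  | cons c cs ih =>
    by_cases h : c = ' '
    · subst h; simp [List.foldl, tokStep_space, ih]
    · simp [List.foldl, h, ih]

theorem strIsdigit_singleton (c : Char) :
    PySem.Str.strIsdigit (String.ofList [c]) = PySem.Chars.isdigit c := by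
  simp [PySem.Str.strIsdigit, PySem.Chars.strIsdigit, String.toList_ofList]

theorem strIsdigit_push {s : String} {c : Char}
    (hs : PySem.Str.strIsdigit s = true) (hc : PySem.Chars.isdigit c = true) :
    PySem.Str.strIsdigit (s.push c) = true := by
  simp only [PySem.Str.strIsdigit] at hs ⊢
  simp only [PySem.Chars.strIsdigit, String.toList_push] at hs ⊢
  simp_all

theorem tokStep_append_nonum {acc : List String} {s : String} {c : Char}
    (hs : PySem.Str.strIsdigit s = false) (hc : c ≠ ' ') :
    tokStep (acc ++ [s]) c = (acc ++ [s]) ++ [String.ofList [c]] := by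
  have hs' : PySem.Chars.strIsdigit s.toList = false := by
    simpa [PySem.Str.strIsdigit] using hs
  simp [tokStep, PySem.Str.strIsdigit, hs', hc]

theorem tokStep_merge {acc : List String} {s : String} {c : Char}
    (hs : PySem.Str.strIsdigit s = true) (hc : PySem.Chars.isdigit c = true) :
    tokStep (acc ++ [s]) c = acc ++ [s.push c] := by
  have hs' : PySem.Chars.strIsdigit s.toList = true := by
    simpa [PySem.Str.strIsdigit] using hs
  simp [tokStep, PySem.Str.strIsdigit, hs', hc]

theorem tokStep_append_nodig {acc : List String} {s : String} {c : Char}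
    (hd : PySem.Chars.isdigit c = false) (hc : c ≠ ' ') :
    tokStep (acc ++ [s]) c = (acc ++ [s]) ++ [String.ofList [c]] := by
  simp [tokStep, PySem.Str.strIsdigit, hd, hc]

-- the combined invariant: running A's loop from a state ending in token s equals that state
-- followed by B's tokens (with the pending digit run absorbed into s when s is numeric)
theorem foldl_tokStep_main (n : Nat) : ∀ (l : List Char), l.length ≤ n →
    (∀ c ∈ l, c ≠ ' ') →
    (∀ (acc : List String) (s : String), PySem.Str.strIsdigit s = false →
        l.foldl tokStep (acc ++ [s]) = (acc ++ [s]) ++ altGo l) ∧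
    (∀ (acc : List String) (s : String), PySem.Str.strIsdigit s = true →
        l.foldl tokStep (acc ++ [s]) =
          acc ++ [String.ofList (s.toList ++ l.takeWhile PySem.Chars.isdigit)]
              ++ altGo (l.dropWhile PySem.Chars.isdigit)) := by
  induction n with
  | zero =>
    intro l hl _
    have : l = [] := List.length_eq_zero_iff.mp (Nat.le_zero.mp hl)
    subst this
    exact ⟨fun acc s _ => by simp [altGo],
           fun acc s _ => by simp [altGo, String.ofList_toList]⟩
  | succ n ih =>
    intro l hl hsp
    cases l with
    | nil =>
      exact ⟨fun acc s _ => by simp [altGo],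
             fun acc s _ => by simp [altGo, String.ofList_toList]⟩
    | cons c cs =>
      have hc : c ≠ ' ' := hsp c (by simp)
      have hsp' : ∀ x ∈ cs, x ≠ ' ' := fun x hx => hsp x (by simp [hx])
      have hlen : cs.length ≤ n := by simpa using Nat.succ_le_succ_iff.mp hl
      constructor
      · intro acc s hs
        by_cases hd : PySem.Chars.isdigit c = true
        · -- s not numeric, c digit: a new digit token starts
          have h1 : PySem.Str.strIsdigit (String.ofList [c]) = true := by
            rw [strIsdigit_singleton]; exact hd
          have hrec := (ih cs hlen hsp').2 (acc ++ [s]) (String.ofList [c]) h1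
          simp only [List.foldl, tokStep_append_nonum hs hc, hrec, altGo, hd, if_pos]
          simp [String.toList_ofList]
        · -- s not numeric, c not digit: c becomes its own token
          have h1 : PySem.Str.strIsdigit (String.ofList [c]) = false := by
            rw [strIsdigit_singleton]; exact Bool.eq_false_iff.mpr hd
          have hrec := (ih cs hlen hsp').1 (acc ++ [s]) (String.ofList [c]) h1
          simp only [List.foldl, tokStep_append_nodig (Bool.eq_false_iff.mpr hd) hc,
            hrec, altGo, hd, if_neg, Bool.false_eq_true, not_false_eq_true]
          simp
      · intro acc s hs
        by_cases hd : PySem.Chars.isdigit c = true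
        · -- s numeric, c digit: merge into the last token
          have hrec := (ih cs hlen hsp').2 acc (s.push c) (strIsdigit_push hs hd)
          simp only [List.foldl, tokStep_merge hs hd, hrec,
            List.takeWhile_cons, List.dropWhile_cons, hd, if_pos, String.toList_push]
          simp
        · -- s numeric, c not digit: the digit run ends, c becomes its own token
          have h1 : PySem.Str.strIsdigit (String.ofList [c]) = false := by
            rw [strIsdigit_singleton]; exact Bool.eq_false_iff.mpr hd
          have hrec := (ih cs hlen hsp').1 (acc ++ [s]) (String.ofList [c]) h1
          simp only [List.foldl, tokStep_append_nodig (Bool.eq_false_iff.mpr hd) hc,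
            hrec, altGo, hd, if_neg, Bool.false_eq_true, not_false_eq_true,
            List.takeWhile_cons, List.dropWhile_cons]
          simp [String.ofList_toList]

-- ===== VERDICT (by name: the statement is the Claim_ definition above) =====
theorem tokenizing_spec : Claim_equal_tokenizing := by
  intro str _
  show tokenizing str = tokenizing_alt str
  unfold tokenizing tokenizing_alt
  dsimp only
  rw [foldl_tokStep_filter]
  set stream := (str.toList.drop 1).filter (fun c => c != ' ') with hstream
  have hsp : ∀ c ∈ stream, c ≠ ' ' := by
    intro c hc
    have := List.of_mem_filter hc
    simpa using this
  have h := (foldl_tokStep_main stream.length stream le_rfl hsp).1 [] " " (by decide)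
  simp only [List.nil_append] at h
  rw [h]
  have hcons : ([" "] ++ altGo stream) = " " :: altGo stream := rfl
  rw [hcons, PySem.List.remove?_cons_self]
  rfl
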